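-- pv_equiv track=rewrite | github.com/ejbarton5554/990-toolkit | build_categories.py | group_fields_by_schedule
-- ===== SOURCE A (Python) =====
-- def group_fields_by_schedule(fields: dict) -> dict[str, list[str]]:
--     """Group canonical field names by their schedule."""
--     groups: dict[str, list[str]] = {}
--     for name, info in fields.items():
--         sched = info.get("schedule", "Unknown")
--         if sched not in groups:
--             groups[sched] = []
--         groups[sched].append(name)
--     return groups
-- ===== SOURCE B (Python) =====
-- def group_fields_by_schedule(fields: dict) -> dict[str, list[str]]:
--     """Group canonical field names by their schedule."""
--     keyed = [(info.get("schedule", "Unknown"), name) for name, info in fields.items()]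
--     scheds = list(dict.fromkeys(s for s, _ in keyed))
--     return {s: [n for t, n in keyed if t == s] for s in scheds}
-- ===== Notes on version B (the rewrite author's own statement) =====
-- stated objective: alternative
-- what changed: Replaced the check-and-append accumulation into a dict by a two-phase pipeline: precompute (schedule, name) pairs, dedup the schedule keys in first-seen order with dict.fromkeys, then build the result with a per-key filter comprehension.
import Mathlib
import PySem

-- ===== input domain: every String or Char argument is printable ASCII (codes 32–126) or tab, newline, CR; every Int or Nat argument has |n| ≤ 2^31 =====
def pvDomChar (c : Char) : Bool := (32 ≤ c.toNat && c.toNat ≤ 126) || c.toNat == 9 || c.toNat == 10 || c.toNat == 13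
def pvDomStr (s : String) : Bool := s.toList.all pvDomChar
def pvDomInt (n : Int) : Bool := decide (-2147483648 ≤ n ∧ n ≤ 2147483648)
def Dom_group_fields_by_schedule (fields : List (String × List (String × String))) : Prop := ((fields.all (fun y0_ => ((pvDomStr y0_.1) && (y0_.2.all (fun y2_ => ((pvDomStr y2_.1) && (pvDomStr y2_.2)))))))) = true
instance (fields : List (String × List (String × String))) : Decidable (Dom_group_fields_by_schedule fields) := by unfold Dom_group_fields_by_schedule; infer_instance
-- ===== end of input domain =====

-- B groups by a two-phase pipeline (precomputed (schedule, name) pairs, ordered key dedup, per-key filter)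
-- instead of A's check-and-append dict accumulation; alternative decomposition, same return value.

-- info.get("schedule", "Unknown") — first-match lookup, shared by both ports
def pvSchedOf (info : List (String × String)) : String :=
  (PySem.Dict.mk info).getD "schedule" "Unknown"

-- ===== PORT A =====
def group_fields_by_schedule (fields : List (String × List (String × String))) : List (String × List String) :=
  (fields.foldl (fun (groups : PySem.Dict String (List String)) p =>
      let sched := pvSchedOf p.2
      let groups := if !(groups.contains sched) then groups.insert sched [] else groups
      groups.modify sched [] (fun l => l ++ [p.1]))
    PySem.Dict.empty).items

-- ===== PORT B =====
def group_fields_by_schedule_alt (fields : List (String × List (String × String))) : List (String × List String) :=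
  let keyed := fields.map (fun p => (pvSchedOf p.2, p.1))
  let scheds := PySem.List.dedup (keyed.map (fun q => q.1))
  scheds.map (fun s => (s, (keyed.filter (fun q => q.1 == s)).map (fun q => q.2)))

-- ===== PRECONDITION & SPEC =====
def Spec_group_fields_by_schedule (fields : List (String × List (String × String))) (out : List (String × List String)) : Prop := out = group_fields_by_schedule_alt fields
instance (fields : List (String × List (String × String))) (out : List (String × List String)) : Decidable (Spec_group_fields_by_schedule fields out) := by unfold Spec_group_fields_by_schedule; infer_instance

-- ===== CLAIM (what is proved, stated in full; the proofs are below) =====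
def Claim_equal_group_fields_by_schedule : Prop := ∀ (fields : List (String × List (String × String))), Dom_group_fields_by_schedule fields → Spec_group_fields_by_schedule fields (group_fields_by_schedule fields)

-- ===== LEMMAS AND PROOFS =====

-- A's loop step
def pvStepA (groups : PySem.Dict String (List String)) (p : String × List (String × String)) :
    PySem.Dict String (List String) :=
  let sched := pvSchedOf p.2
  let groups := if !(groups.contains sched) then groups.insert sched [] else groups
  groups.modify sched [] (fun l => l ++ [p.1])

theorem pvStepA_getD (d : PySem.Dict String (List String)) (p : String × List (String × String)) (c : String) :
    (pvStepA d p).getD c [] =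
      if c = pvSchedOf p.2 then d.getD c [] ++ [p.1] else d.getD c [] := by
  unfold pvStepA
  by_cases hc : c = pvSchedOf p.2 <;>
    by_cases h : d.contains (pvSchedOf p.2)
  · subst hc; simp [h]
  · subst hc
    simp only [Bool.not_eq_true] at h
    simp [h, PySem.Dict.getD_of_not_contains (h := h)]
  · simp [h, PySem.Dict.getD_modify, hc]
  · simp only [Bool.not_eq_true] at h
    simp [h, PySem.Dict.getD_modify, PySem.Dict.getD_insert, hc]

theorem pvFold_getD (l : List (String × List (String × String)))
    (d : PySem.Dict String (List String)) (c : String) :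
    (l.foldl pvStepA d).getD c [] =
      d.getD c [] ++ ((l.map (fun p => (pvSchedOf p.2, p.1))).filter (fun q => q.1 == c)).map (fun q => q.2) := by
  induction l generalizing d with
  | nil => simp
  | cons x xs ih =>
    simp only [List.foldl_cons, List.map_cons, List.filter_cons]
    rw [ih, pvStepA_getD]
    by_cases h : c = pvSchedOf x.2
    · simp [h.symm]
    · have h' : ¬ (pvSchedOf x.2 = c) := fun e => h e.symm
      simp [h, h']

theorem pvStepA_keys (d : PySem.Dict String (List String)) (p : String × List (String × String)) :
    (pvStepA d p).keys = PySem.Set.add d.keys (pvSchedOf p.2) := by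
  unfold pvStepA
  by_cases h : d.contains (pvSchedOf p.2)
  · have hm : pvSchedOf p.2 ∈ d.keys := (PySem.Dict.contains_iff_mem_keys d _).mp h
    simp [h, PySem.Dict.keys_modify, PySem.Dict.keys_insert_of_contains (h := h),
      PySem.Set.add, hm]
  · simp only [Bool.not_eq_true] at h
    have hm : pvSchedOf p.2 ∉ d.keys := by
      intro hmem
      rw [← PySem.Dict.contains_iff_mem_keys] at hmem
      simp [h] at hmem
    simp [h, PySem.Dict.keys_modify, PySem.Dict.insert_insert_self,
      PySem.Dict.keys_insert_of_not_contains (h := h), PySem.Set.add, hm]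

theorem pvFold_keys (l : List (String × List (String × String)))
    (d : PySem.Dict String (List String)) :
    (l.foldl pvStepA d).keys = PySem.Set.update d.keys (l.map (fun p => pvSchedOf p.2)) := by
  induction l generalizing d with
  | nil => simp [PySem.Set.update_nil]
  | cons x xs ih =>
    simp only [List.foldl_cons, List.map_cons]
    rw [ih, pvStepA_keys, PySem.Set.update_cons]

theorem pvFold_nodup (l : List (String × List (String × String)))
    (d : PySem.Dict String (List String)) (h : d.keys.Nodup) :
    (l.foldl pvStepA d).keys.Nodup := by
  induction l generalizing d with
  | nil => exact h
  | cons x xs ih =>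
    refine ih _ ?_
    rw [pvStepA_keys]
    exact PySem.Set.nodup_add _ _ h

-- ===== VERDICT (by name: the statement is the Claim_ definition above) =====
theorem group_fields_by_schedule_spec : Claim_equal_group_fields_by_schedule := by
  intro fields _
  unfold Spec_group_fields_by_schedule group_fields_by_schedule group_fields_by_schedule_alt
  have hnd : (fields.foldl pvStepA PySem.Dict.empty).keys.Nodup :=
    pvFold_nodup _ _ (by simp)
  show (fields.foldl pvStepA PySem.Dict.empty).items = _
  rw [PySem.Dict.items_eq_map_keys _ hnd ([] : List String)]
  rw [pvFold_keys]
  have hk : PySem.Set.update (PySem.Dict.empty : PySem.Dict String (List String)).keys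
        (fields.map (fun p => pvSchedOf p.2))
      = PySem.List.dedup ((fields.map (fun p => (pvSchedOf p.2, p.1))).map (fun q => q.1)) := by
    simp [PySem.Set.update_nil_left, PySem.List.dedup_eq_ofList, List.map_map, Function.comp_def]
  rw [hk]
  refine List.map_congr_left ?_
  intro s _
  rw [pvFold_getD]
  simp
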